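-- pv_equiv track=rewrite | github.com/ryong9rrr/coding-test-python | 자료구조_큐, 우선순위 큐/프로그래머스lv2-스킬트리.py | check_skill
-- ===== SOURCE A (Python) =====
-- from collections import deque, defaultdict
-- from collections import deque
--
-- def check_skill(key:str, target:str)->int:
--     dic = defaultdict(int)
--     for i, v in enumerate(key):
--         dic[v] = i + 1
--     visited = [True] + [False] * 26
--     q = deque()
--     for a in target:
--         q.append(a)
--
--     while q:
--         x = q.popleft()
--         if dic[x]:
--             if visited[dic[x] - 1]:
--                 visited[dic[x]] = True
--             else:
--                 return 0
--     if not q: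
--         return 1
-- ===== SOURCE B (Python) =====
-- def check_skill(key: str, target: str) -> int:
--     pos = {c: i for i, c in enumerate(key)}
--     mapped = [pos[c] for c in target if c in pos]
--     firsts = list(dict.fromkeys(mapped))
--     return 1 if firsts == list(range(len(firsts))) else 0
-- ===== Notes on version B (the rewrite author's own statement) =====
-- stated objective: idiomatic
-- what changed: B replaces A's stateful deque scan over a 27-slot boolean visited array with three staged passes: map target to key indices, take first occurrences with dict.fromkeys, and test that this dedup list equals range(len) - no per-step state machine or early return.
-- outside the precondition, e.g. on check_skill('abcdefghijklmnopqrstuvwxyz0', '0'): A returns 0, B returns 0; on check_skill('abcdefghijklmnopqrstuvwxyz0', 'abcdefghijklmnopqrstuvwxyz0'): A raises IndexError, B returns 1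
import Mathlib
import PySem

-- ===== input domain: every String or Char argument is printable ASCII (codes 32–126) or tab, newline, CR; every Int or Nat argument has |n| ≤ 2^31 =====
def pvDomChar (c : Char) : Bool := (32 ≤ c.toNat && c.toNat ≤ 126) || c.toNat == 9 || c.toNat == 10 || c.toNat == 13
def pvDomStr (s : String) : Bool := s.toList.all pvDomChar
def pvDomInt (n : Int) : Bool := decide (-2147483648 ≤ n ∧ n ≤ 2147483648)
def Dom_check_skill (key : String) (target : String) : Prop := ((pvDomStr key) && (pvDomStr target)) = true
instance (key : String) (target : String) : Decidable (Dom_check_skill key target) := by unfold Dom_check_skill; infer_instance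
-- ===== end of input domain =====

-- B: three staged passes — map target to key-indices, dedup first occurrences (dict.fromkeys), compare with range — instead of A's stateful deque scan over a 27-slot visited array.


-- ===== PORT A =====
-- while q: pop x; if dic[x]: if visited[dic[x]-1]: visited[dic[x]] = True else: return 0
-- pySetD is the total form of Python's list assignment; inside Pre_ the index dic[x] ≤ 26 is in range, so it is exact.
def checkALoop (dic : PySem.Dict Char Int) (visited : List Bool) : List Char → Int
  | [] => 1
  | x :: q =>
    let d := dic.getD x 0            -- defaultdict(int): missing key reads as 0
    if d ≠ 0 then
      if PySem.List.pyGetD visited (d - 1) false then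
        checkALoop dic (PySem.List.pySetD visited d true) q
      else 0
    else checkALoop dic visited q

def check_skill (key : String) (target : String) : Int :=
  let dic : PySem.Dict Char Int :=
    (PySem.List.enumerate key.toList 0).foldl (fun d p => d.insert p.2 (p.1 + 1)) PySem.Dict.empty
  let visited : List Bool := [true] ++ List.replicate 26 false
  checkALoop dic visited target.toList

-- ===== PORT B =====
-- pos = {c: i for i, c in enumerate(key)}; mapped = [pos[c] for c in target if c in pos];
-- firsts = list(dict.fromkeys(mapped)) (= PySem.List.dedup); return 1 if firsts == list(range(len(firsts))) else 0
def check_skill_alt (key : String) (target : String) : Int :=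
  let pos : PySem.Dict Char Int :=
    (PySem.List.enumerate key.toList 0).foldl (fun d p => d.insert p.2 p.1) PySem.Dict.empty
  let mapped : List Int := target.toList.filterMap (fun c => pos.get? c)
  let firsts : List Int := PySem.List.dedup mapped
  if firsts = PySem.List.pyRange 0 (firsts.length : Int) 1 then 1 else 0

-- ===== PRECONDITION & SPEC =====
-- Pre_ excludes targets containing a character that occurs in key at index ≥ 26: A's visited array has only 27
-- slots, so on such inputs A raises IndexError once the unlock chain reaches that character (and where it still
-- returns, the excluded value is the same 0/1 B computes — see the cite in the claim).
def Pre_check_skill (key : String) (target : String) : Prop :=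
  (target.toList.all (fun c => !((key.toList.drop 26).contains c))) = true
instance (key : String) (target : String) : Decidable (Pre_check_skill key target) := by
  unfold Pre_check_skill; infer_instance
def pvWitness_check_skill : String × String := ("abc", "aabcb")
def Spec_check_skill (key : String) (target : String) (out : Int) : Prop := out = check_skill_alt key target
instance (key : String) (target : String) (out : Int) : Decidable (Spec_check_skill key target out) := by unfold Spec_check_skill; infer_instance

-- ===== CLAIM (what is proved, stated in full; the proofs are below) =====
def Claim_equal_check_skill : Prop := ∀ (key : String) (target : String), Dom_check_skill key target → Pre_check_skill key target → Spec_check_skill key target (check_skill key target)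

-- ===== LEMMAS AND PROOFS =====

-- Proof-only intermediate: the single-pass counter scan, bridging A's visited array and B's staged passes.
def scanT (pos : PySem.Dict Char Int) (progress : Int) : List Char → Int
  | [] => 1
  | c :: rest =>
    match pos.get? c with
    | some i =>
      if i > progress then 0
      else if i = progress then scanT pos (progress + 1) rest
      else scanT pos progress rest
    | none => scanT pos progress rest

def counterScan (p : Int) : List Int → Int
  | [] => 1
  | i :: r => if i > p then 0 else if i = p then counterScan (p + 1) r else counterScan p r

def isConsecFrom (p : Int) : List Int → Bool
  | [] => true
  | i :: r => i == p && isConsecFrom (p + 1) r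

-- the elements of l that are new w.r.t. the already-collected list s, in first-occurrence order
def newOnes (s : List Int) : List Int → List Int
  | [] => []
  | i :: r => if s.contains i then newOnes s r else i :: newOnes (s ++ [i]) r

-- A's dict (1-based positions) and B's dict (0-based) are built by the same fold and stay in lockstep.
theorem dict_rel (l : List (Int × Char)) (d1 d2 : PySem.Dict Char Int)
    (h : ∀ x, d1.getD x 0 = match d2.get? x with | some i => i + 1 | none => 0) :
    ∀ x, (l.foldl (fun d p => d.insert p.2 (p.1 + 1)) d1).getD x 0 =
      match (l.foldl (fun d p => d.insert p.2 p.1) d2).get? x with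
      | some i => i + 1 | none => 0 := by
  induction l generalizing d1 d2 with
  | nil => exact h
  | cons p l ih =>
    refine ih _ _ (fun x => ?_)
    rw [PySem.Dict.getD_insert, PySem.Dict.get?_insert]
    split_ifs with hx
    · rfl
    · exact h x

-- Any value looked up in a fold of inserts came from the list or the start dict.
theorem get?_foldl_insert_mem (l : List (Int × Char)) (d : PySem.Dict Char Int) (c : Char) (i : Int)
    (h : (l.foldl (fun d p => d.insert p.2 p.1) d).get? c = some i) :
    (i, c) ∈ l ∨ d.get? c = some i := by
  induction l generalizing d with
  | nil => exact Or.inr h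
  | cons p l ih =>
    rcases ih _ h with hm | hd
    · exact Or.inl (List.mem_cons_of_mem _ hm)
    · rw [PySem.Dict.get?_insert] at hd
      split_ifs at hd with hc
      · exact Or.inl (by simp at hd; simp [hc, ← hd])
      · exact Or.inr hd

theorem mem_enumerate_spec (l : List Char) (s i : Int) (x : Char)
    (h : (i, x) ∈ PySem.List.enumerate l s) : ∃ n : Nat, i = s + n ∧ l[n]? = some x := by
  induction l generalizing s with
  | nil => simp [PySem.List.enumerate_nil] at h
  | cons a l ih =>
    rw [PySem.List.enumerate_cons] at h
    rcases List.mem_cons.mp h with h0 | hm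
    · exact ⟨0, by simp_all⟩
    · obtain ⟨n, hn, hx⟩ := ih (s + 1) hm
      exact ⟨n + 1, by omega, by simpa using hx⟩

-- Core invariant: A's visited array is exactly the prefix {0..progress} of the counter scan.
theorem loop_eq (dic pos : PySem.Dict Char Int)
    (hrel : ∀ x, dic.getD x 0 = match pos.get? x with | some i => i + 1 | none => 0)
    (t : List Char) (p : Int) (visited : List Bool)
    (hp : 0 ≤ p)
    (hb : ∀ c ∈ t, ∀ i, pos.get? c = some i → 0 ≤ i ∧ i < 26)
    (hlen : visited.length = 27)
    (hvis : ∀ j : Nat, j < 27 → visited[j]? = some (decide ((j : Int) ≤ p))) :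
    checkALoop dic visited t = scanT pos p t := by
  induction t generalizing p visited with
  | nil => rfl
  | cons c rest ih =>
    have hbrest : ∀ c ∈ rest, ∀ i, pos.get? c = some i → 0 ≤ i ∧ i < 26 :=
      fun c hc => hb c (List.mem_cons_of_mem _ hc)
    rw [checkALoop, scanT]
    cases hg : pos.get? c with
    | none =>
      have hd : dic.getD c 0 = 0 := by rw [hrel c, hg]
      simp only [hd]
      simpa using ih p visited hp hbrest hlen hvis
    | some i =>
      obtain ⟨hi0, hi26⟩ := hb c (List.mem_cons_self) i hg
      have hd : dic.getD c 0 = i + 1 := by rw [hrel c, hg]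
      have hne : dic.getD c 0 ≠ 0 := by omega
      have hread : PySem.List.pyGetD visited (dic.getD c 0 - 1) false = decide (i ≤ p) := by
        rw [hd, show i + 1 - 1 = i from by ring]
        have h2 : i < (visited.length : Int) := by omega
        rw [PySem.List.pyGetD_eq_getElem visited false hi0 h2]
        have hv := hvis i.toNat (by omega)
        have : visited[i.toNat]? = some (decide (i ≤ p)) := by
          rw [hv]; congr 1; simp only [decide_eq_decide]; omega
        rw [List.getElem?_eq_getElem (by omega)] at this
        exact Option.some.inj this
      simp only [hne, if_true, ne_eq, not_false_iff, hread]
      by_cases hip : i ≤ p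
      · have hset : PySem.List.pySetD visited (dic.getD c 0) true =
            visited.set (i + 1).toNat true := by
          rw [hd, PySem.List.pySetD_of_nonneg _ _ (by omega)]
        have hlen' : (visited.set (i + 1).toNat true).length = 27 := by simp [hlen]
        rcases eq_or_lt_of_le hip with heq | hlt
        · -- i = p : progress advances
          have hAB : checkALoop dic (visited.set (i + 1).toNat true) rest =
              scanT pos (p + 1) rest := by
            refine ih (p + 1) _ (by omega) hbrest hlen' (fun j hj => ?_)
            by_cases hj' : j = (i + 1).toNat
            · subst hj'
              rw [List.getElem?_set_self (by omega)]
              congr 1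
              symm
              rw [decide_eq_true_eq]
              omega
            · rw [List.getElem?_set_ne (fun hc' => hj' hc'.symm)]
              rw [hvis j hj]
              congr 1
              simp only [decide_eq_decide]
              omega
          simp [hset, hAB, ← heq]
        · -- i < p : slot already unlocked, set is value-preserving
          have hAB : checkALoop dic (visited.set (i + 1).toNat true) rest =
              scanT pos p rest := by
            refine ih p _ hp hbrest hlen' (fun j hj => ?_)
            by_cases hj' : j = (i + 1).toNat
            · subst hj'
              rw [List.getElem?_set_self (by omega)]
              congr 1
              symm
              rw [decide_eq_true_eq]
              omega
            · rw [List.getElem?_set_ne (fun hc' => hj' hc'.symm)]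
              exact hvis j hj
          have hnp : ¬ i > p := by omega
          have hne' : ¬ i = p := by omega
          simp [hip, hset, hAB, hnp, hne']
      · -- i > p : both return 0
        have : i > p := by omega
        simp [hip, this]

theorem initial_visited (j : Nat) (hj : j < 27) :
    ([true] ++ List.replicate 26 false)[j]? = some (decide ((j : Int) ≤ 0)) := by
  cases j with
  | zero => simp
  | succ n =>
    have hn : n < 26 := by omega
    simp only [List.singleton_append, List.getElem?_cons_succ, List.getElem?_replicate,
      if_pos hn]
    congr 1

-- the character scan with a dict lookup is the counter scan over the filtered index list
theorem scanT_eq_counter (pos : PySem.Dict Char Int) :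
    ∀ (t : List Char) (p : Int), scanT pos p t = counterScan p (t.filterMap (fun c => pos.get? c)) := by
  intro t
  induction t with
  | nil => intro p; rfl
  | cons c rest ih =>
    intro p
    rw [scanT, List.filterMap_cons]
    cases hg : pos.get? c with
    | none => exact ih p
    | some i =>
      rw [counterScan]
      by_cases h1 : i > p
      · simp [h1]
      · by_cases h2 : i = p <;> simp [h1, h2, ih]

-- dedup (dict.fromkeys) is the fold of Set.add; relate it to the head recursion newOnes
theorem foldl_add_eq_newOnes : ∀ (l s : List Int), l.foldl PySem.Set.add s = s ++ newOnes s l := by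
  intro l
  induction l with
  | nil => simp [newOnes]
  | cons i r ih =>
    intro s
    rw [List.foldl_cons, newOnes]
    by_cases hc : i ∈ s
    · simp [PySem.Set.add, hc, ih]
    · simp [PySem.Set.add, hc, ih (s ++ [i])]

theorem dedup_eq_newOnes (l : List Int) : PySem.List.dedup l = newOnes [] l := by
  rw [PySem.List.dedup_eq_ofList, PySem.Set.ofList_eq_foldl, foldl_add_eq_newOnes]
  rfl

-- counter scan succeeds iff the new first occurrences are exactly p, p+1, p+2, …
theorem counter_eq_consec : ∀ (l : List Int) (p : Int) (s : List Int), 0 ≤ p →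
    (∀ x ∈ l, 0 ≤ x) → (∀ x : Int, s.contains x = decide (0 ≤ x ∧ x < p)) →
    counterScan p l = if isConsecFrom p (newOnes s l) then 1 else 0 := by
  intro l
  induction l with
  | nil => intros; simp [counterScan, newOnes, isConsecFrom]
  | cons i r ih =>
    intro p s hp h0 hs
    have hi0 : 0 ≤ i := h0 i (List.mem_cons_self)
    have h0r : ∀ x ∈ r, 0 ≤ x := fun x hx => h0 x (List.mem_cons_of_mem _ hx)
    rw [counterScan, newOnes, hs i]
    simp only [decide_eq_true_eq]
    by_cases hip : i < p
    · have e1 : (if 0 ≤ i ∧ i < p then newOnes s r else i :: newOnes (s ++ [i]) r) = newOnes s r :=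
        if_pos ⟨hi0, hip⟩
      rw [e1, if_neg (by omega : ¬ i > p), if_neg (by omega : ¬ i = p)]
      exact ih p s hp h0r hs
    · have e1 : (if 0 ≤ i ∧ i < p then newOnes s r else i :: newOnes (s ++ [i]) r) =
          i :: newOnes (s ++ [i]) r := if_neg (by omega : ¬ (0 ≤ i ∧ i < p))
      rw [e1, isConsecFrom]
      by_cases hgt : i > p
      · rw [if_pos hgt]
        have hbeq : (i == p) = false := by simp; omega
        simp [hbeq]
      · have heq : i = p := by omega
        rw [if_neg hgt, if_pos heq, heq]
        simp only [BEq.rfl, Bool.true_and]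
        refine ih (p + 1) (s ++ [p]) (by omega) h0r (fun x => ?_)
        rw [List.contains_append, hs x]
        by_cases hxp : x = p
        · simp [hxp]; omega
        · have hnp : ([p].contains x) = false := by simp [hxp]
          rw [hnp, Bool.or_false, decide_eq_decide]
          omega

-- a list is consecutive from p iff it equals range(p, p + len)
theorem consec_iff_range : ∀ (l : List Int) (p : Int),
    isConsecFrom p l = true ↔ l = PySem.List.pyRange p (p + (l.length : Int)) 1 := by
  intro l
  induction l with
  | nil => intro p; simp [isConsecFrom, PySem.List.pyRange_one_eq_nil (le_of_eq (by ring))]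
  | cons i r ih =>
    intro p
    rw [show p + (((i :: r).length : Nat) : Int) = (p + 1) + (r.length : Int) by
      simp only [List.length_cons]; omega]
    rw [isConsecFrom, PySem.List.pyRange_one_cons (by omega)]
    simp only [Bool.and_eq_true, beq_iff_eq, List.cons.injEq, ih (p + 1)]

-- every value in B's pos dict is a nonnegative key index
theorem pos_values_nonneg (key : String) (c : Char) (i : Int)
    (h : ((PySem.List.enumerate key.toList 0).foldl (fun d p => d.insert p.2 p.1)
      PySem.Dict.empty).get? c = some i) : 0 ≤ i := by
  rcases get?_foldl_insert_mem _ _ _ _ h with hm | hd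
  · obtain ⟨n, hn, _⟩ := mem_enumerate_spec _ _ _ _ hm
    omega
  · simp [PySem.Dict.get?_empty] at hd

-- ===== VERDICT (by name: the statement is the Claim_ definition above) =====
theorem check_skill_spec : Claim_equal_check_skill := by
  intro key target _hdom hpre
  unfold Pre_check_skill at hpre
  have hpre' : ∀ c ∈ target.toList, c ∉ key.toList.drop 26 := by
    simpa [List.all_eq_true] using hpre
  unfold Spec_check_skill check_skill check_skill_alt
  set pos : PySem.Dict Char Int :=
    (PySem.List.enumerate key.toList 0).foldl (fun d p => d.insert p.2 p.1) PySem.Dict.empty with hpos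
  set mapped : List Int := target.toList.filterMap (fun c => pos.get? c) with hmapped
  have hA : checkALoop
      ((PySem.List.enumerate key.toList 0).foldl (fun d p => d.insert p.2 (p.1 + 1)) PySem.Dict.empty)
      ([true] ++ List.replicate 26 false) target.toList = scanT pos 0 target.toList := by
    refine loop_eq _ _ ?_ _ 0 _ le_rfl ?_ (by simp) initial_visited
    · exact dict_rel _ _ _ (fun x => by simp)
    · intro c hc i hg
      rcases get?_foldl_insert_mem _ _ _ _ hg with hm | hd
      · obtain ⟨n, hn, hx⟩ := mem_enumerate_spec _ _ _ _ hm
        have hc26 : c ∉ key.toList.drop 26 := hpre' c hc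
        have hnlt : n < 26 := by
          by_contra hge
          apply hc26
          have : (key.toList.drop 26)[n - 26]? = some c := by
            rw [List.getElem?_drop]
            rwa [show 26 + (n - 26) = n by omega]
          exact List.mem_of_getElem? this
        constructor <;> omega
      · simp [PySem.Dict.get?_empty] at hd
  have h0 : ∀ x ∈ mapped, 0 ≤ x := by
    intro x hx
    rw [hmapped, List.mem_filterMap] at hx
    obtain ⟨c, _, hg⟩ := hx
    exact pos_values_nonneg key c x hg
  have hcounter : counterScan 0 mapped = if isConsecFrom 0 (newOnes [] mapped) then 1 else 0 :=
    counter_eq_consec mapped 0 [] le_rfl h0 (fun x => by simp)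
  rw [hA, scanT_eq_counter, ← hmapped, hcounter, ← dedup_eq_newOnes]
  by_cases hcons : isConsecFrom 0 (PySem.List.dedup mapped) = true
  · rw [if_pos hcons, if_pos]
    have h := (consec_iff_range _ 0).mp hcons
    simpa using h
  · rw [if_neg hcons, if_neg]
    intro heq
    exact hcons ((consec_iff_range _ 0).mpr (by simpa using heq))
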